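-- pv_equiv track=rewrite | github.com/Recyavik/1TSTART_Python | DEV_1_1/1_1_Def_Str.py | process_list
-- ===== SOURCE A (Python) =====
-- def process_list(a):
--     count = 0
--     for el in a:
--         st = str(el)
--         before = st[0]
--         for i in range(1, len(st)): # Акцент -1
--             if st[i] > before:
--                 break
--             else:
--                 before = st[i]
--         else:
--             count +=1
--     return count
-- ===== SOURCE B (Python) =====
-- def process_list(a):
--     # count elements whose decimal representation is non-increasing:
--     # equivalently, str(el) equals its own descending sort
--     return sum(1 for el in a if (lambda s: s == ''.join(sorted(s, reverse=True)))(str(el)))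
-- ===== Notes on version B (the rewrite author's own statement) =====
-- stated objective: simpler
-- what changed: replaces the index loop with a running 'before' character by comparing str(el) against its descending sort, summed in one comprehension
import Mathlib
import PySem

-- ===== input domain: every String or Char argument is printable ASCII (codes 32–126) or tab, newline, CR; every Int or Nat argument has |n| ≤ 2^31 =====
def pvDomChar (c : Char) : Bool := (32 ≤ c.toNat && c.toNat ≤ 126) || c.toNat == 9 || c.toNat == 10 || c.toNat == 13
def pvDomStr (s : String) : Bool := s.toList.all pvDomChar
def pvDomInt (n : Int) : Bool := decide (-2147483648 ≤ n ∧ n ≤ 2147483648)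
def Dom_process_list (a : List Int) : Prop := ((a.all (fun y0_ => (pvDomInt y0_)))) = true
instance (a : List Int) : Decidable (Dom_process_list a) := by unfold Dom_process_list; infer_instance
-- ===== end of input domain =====

-- B replaces A's index loop with a compare-against-descending-sort test; objective: simpler.

-- ===== PORT A =====
-- A's inner 'for i in range(1, len(st))' loop with its running 'before' character
def pvAScan (before : Char) : List Char → Bool
  | [] => true
  | c :: rest => if before < c then false else pvAScan c rest

def process_list (a : List Int) : Int :=
  a.foldl (fun count el =>
    match (PySem.Int.toStr el).toList with
    | [] => count          -- unreachable: str(int) is never empty (Python's st[0] would raise)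
    | c :: rest => if pvAScan c rest then count + 1 else count) 0

-- ===== PORT B =====
def pvBOk (el : Int) : Bool :=
  let s := (PySem.Int.toStr el).toList
  decide (s = PySem.List.sorted s (fun c => c) true)   -- s == ''.join(sorted(s, reverse=True))

def process_list_alt (a : List Int) : Int :=
  ((a.filter pvBOk).length : Int)

-- ===== PRECONDITION & SPEC =====
def Spec_process_list (a : List Int) (out : Int) : Prop := out = process_list_alt a
instance (a : List Int) (out : Int) : Decidable (Spec_process_list a out) := by unfold Spec_process_list; infer_instance

-- ===== CLAIM (what is proved, stated in full; the proofs are below) =====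
def Claim_equal_process_list : Prop := ∀ (a : List Int), Dom_process_list a → Spec_process_list a (process_list a)

-- ===== LEMMAS AND PROOFS =====

theorem pvToChars_ne_nil (n : Int) : PySem.Int.toChars n ≠ [] := by
  unfold PySem.Int.toChars
  split
  · simp
  · intro h
    have := Nat.length_toDigits_pos (b := 10) (n := n.toNat)
    simp [h] at this

theorem pvAScan_iff_pairwise (before : Char) (l : List Char) :
    pvAScan before l = true ↔ (before :: l).Pairwise (fun a b => b ≤ a) := by
  induction l generalizing before with
  | nil => simp [pvAScan]
  | cons c rest ih =>
      rw [pvAScan]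
      constructor
      · intro h
        by_cases hb : before < c
        · rw [if_pos hb] at h; exact Bool.noConfusion h
        · rw [if_neg hb] at h
          have hp := (ih c).mp h
          refine List.pairwise_cons.mpr ⟨?_, hp⟩
          intro x hx
          rcases List.mem_cons.mp hx with rfl | hx
          · exact le_of_not_gt hb
          · exact le_trans ((List.pairwise_cons.mp hp).1 x hx) (le_of_not_gt hb)
      · intro hp
        have h1 := (List.pairwise_cons.mp hp).1 c (by simp)
        rw [if_neg (not_lt.mpr h1)]
        exact (ih c).mpr (List.pairwise_cons.mp hp).2

theorem pvBOk_eq_scan (el : Int) :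
    pvBOk el = (match (PySem.Int.toStr el).toList with
                | [] => true
                | c :: rest => pvAScan c rest) := by
  simp only [pvBOk]
  cases hs : (PySem.Int.toStr el).toList with
  | nil => simp [PySem.List.sorted]
  | cons c rest =>
      simp only []
      cases h : pvAScan c rest with
      | true =>
          have hp := (pvAScan_iff_pairwise c rest).mp h
          have hsort := PySem.List.sorted_rev_eq_self_of_pairwise (c :: rest) (fun c : Char => c) hp
          simp [hsort]
      | false =>
          simp only [decide_eq_false_iff_not]
          intro heq
          have hp : (c :: rest).Pairwise (fun a b : Char => b ≤ a) := by
            have := PySem.List.sorted_pairwise_rev (xs := c :: rest) (key := fun c : Char => c)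
            rw [← heq] at this
            exact this
          rw [(pvAScan_iff_pairwise c rest).mpr hp] at h
          exact Bool.noConfusion h

theorem pvStep_eq (count el : Int) :
    (match (PySem.Int.toStr el).toList with
     | [] => count
     | c :: rest => if pvAScan c rest then count + 1 else count)
    = count + (if pvBOk el then 1 else 0) := by
  rw [pvBOk_eq_scan]
  cases hs : (PySem.Int.toStr el).toList with
  | nil =>
      exfalso
      rw [PySem.Int.toList_toStr] at hs
      exact pvToChars_ne_nil el hs
  | cons c r => by_cases h : pvAScan c r = true <;> simp [h]

theorem pvFold_eq_count (a : List Int) (count : Int) :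
    a.foldl (fun count el =>
      match (PySem.Int.toStr el).toList with
      | [] => count
      | c :: rest => if pvAScan c rest then count + 1 else count) count
    = count + ((a.filter pvBOk).length : Int) := by
  induction a generalizing count with
  | nil => simp
  | cons el rest ih =>
      rw [List.foldl_cons]
      show List.foldl _ (match (PySem.Int.toStr el).toList with
        | [] => count
        | c :: r => if pvAScan c r then count + 1 else count) rest = _
      rw [ih, pvStep_eq, List.filter_cons]
      by_cases h : pvBOk el = true <;> simp [h] <;> push_cast <;> ring

-- ===== VERDICT (by name: the statement is the Claim_ definition above) =====
theorem process_list_spec : Claim_equal_process_list := by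
  intro a _
  show process_list a = process_list_alt a
  unfold process_list process_list_alt
  simpa using pvFold_eq_count a 0
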